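-- pv_equiv track=rewrite | github.com/PabloRodriguezElvira/MUD-NERC-Task | NERC-nn/biobert_ner.py | _ordered_labels
-- ===== SOURCE A (Python) =====
-- def _ordered_labels(labels):
--     remaining = set(labels)
--     ordered = []
--
--     if "O" in remaining:
--         ordered.append("O")
--         remaining.remove("O")
--
--     for prefix in ("B-", "I-"):
--         current = sorted(label for label in remaining if label.startswith(prefix))
--         ordered.extend(current)
--         remaining.difference_update(current)
--
--     ordered.extend(sorted(remaining))
--     return ordered
-- ===== SOURCE B (Python) =====
-- def _ordered_labels(labels):
--     def rank(label):
--         if label == "O":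
--             return 0
--         if label.startswith("B-"):
--             return 1
--         if label.startswith("I-"):
--             return 2
--         return 3
--
--     return sorted(set(labels), key=lambda label: (rank(label), label))
-- ===== Notes on version B (the rewrite author's own statement) =====
-- stated objective: simpler
-- what changed: Replaces the bucket-by-bucket partitioning (ordered list built up across an O-special-case, two prefix-filter passes with set.difference_update, and a final residue sort) with a single sort of the deduplicated labels keyed on a (category-rank, label) tuple.
import Mathlib
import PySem

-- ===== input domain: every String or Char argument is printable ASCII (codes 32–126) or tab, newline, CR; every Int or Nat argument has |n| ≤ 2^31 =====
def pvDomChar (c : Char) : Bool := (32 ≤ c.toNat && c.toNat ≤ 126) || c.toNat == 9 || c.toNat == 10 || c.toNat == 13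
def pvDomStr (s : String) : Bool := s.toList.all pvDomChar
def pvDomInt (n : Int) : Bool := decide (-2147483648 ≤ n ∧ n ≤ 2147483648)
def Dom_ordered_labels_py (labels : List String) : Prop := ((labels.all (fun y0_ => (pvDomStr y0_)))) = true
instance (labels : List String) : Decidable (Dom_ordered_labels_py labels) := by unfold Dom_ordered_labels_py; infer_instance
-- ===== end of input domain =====

-- B replaces A's bucket-by-bucket partitioning with one sort of the deduplicated
-- labels keyed on a (category-rank, label) tuple; objective: simpler.


-- ===== PORT A =====
def ordered_labels_py (labels : List String) : List String :=
  let remaining : PySem.Set String := PySem.Set.ofList labels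
  let ordered : List String := []
  -- if "O" in remaining: ordered.append("O"); remaining.remove("O")
  -- (remove is guarded by the membership test, so it equals discard here)
  let st1 : List String × PySem.Set String :=
    if PySem.Set.contains remaining "O" then
      (ordered ++ ["O"], PySem.Set.discard remaining "O")
    else (ordered, remaining)
  -- for prefix in ("B-", "I-"): …
  let st2 : List String × PySem.Set String :=
    ["B-", "I-"].foldl
      (fun st pfx =>
        let current := PySem.List.sorted
          (List.filter (fun label => PySem.Str.startswith label pfx) st.2) (fun x => x)
        (st.1 ++ current, PySem.Set.diff st.2 current))
      st1
  st2.1 ++ PySem.List.sorted st2.2 (fun x => x)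

-- ===== PORT B =====
def pvRank (label : String) : Int :=
  if label == "O" then 0
  else if PySem.Str.startswith label "B-" then 1
  else if PySem.Str.startswith label "I-" then 2
  else 3

def ordered_labels_py_alt (labels : List String) : List String :=
  PySem.List.sorted2 (PySem.Set.ofList labels) pvRank (fun label => label)

-- ===== PRECONDITION & SPEC =====
def Spec_ordered_labels_py (labels : List String) (out : List String) : Prop := out = ordered_labels_py_alt labels
instance (labels : List String) (out : List String) : Decidable (Spec_ordered_labels_py labels out) := by unfold Spec_ordered_labels_py; infer_instance

-- ===== CLAIM (what is proved, stated in full; the proofs are below) =====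
def Claim_equal_ordered_labels_py : Prop := ∀ (labels : List String), Dom_ordered_labels_py labels → Spec_ordered_labels_py labels (ordered_labels_py labels)

-- ===== LEMMAS AND PROOFS =====

-- B's tuple-keyed sort is A's-side sort under the lexicographic key.
lemma sorted2_eq_sorted_lex (xs : List String) :
    PySem.List.sorted2 xs pvRank (fun l => l) =
      PySem.List.sorted xs (fun l => toLex (pvRank l, l)) := by
  unfold PySem.List.sorted2 PySem.List.sorted
  have hcmp : (fun a b : String =>
      decide (pvRank a < pvRank b) || (!decide (pvRank b < pvRank a) && decide (a < b)))
      = fun a b : String => decide (toLex (pvRank a, a) < toLex (pvRank b, b)) := by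
    funext a b
    rcases lt_trichotomy (pvRank a) (pvRank b) with h | h | h
    · simp [h, Prod.Lex.lt_iff, not_lt.mpr (le_of_lt h)]
    · simp [h, Prod.Lex.lt_iff]
    · simp only [Prod.Lex.lt_iff]
      simp [not_lt.mpr (le_of_lt h), ne_of_gt h]
      exact fun hab => absurd hab (not_le.mpr h)
  simp only [Bool.false_eq_true, if_false, hcmp]

lemma pairwise_lex_of_const_rank (l : List String) (r : Int)
    (hm : ∀ x ∈ l, pvRank x = r) (hnd : l.Nodup)
    (hle : l.Pairwise (fun a b => a ≤ b)) :
    l.Pairwise (fun a b => toLex (pvRank a, a) < toLex (pvRank b, b)) := by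
  refine (hle.and hnd).imp_of_mem ?_
  intro a b ha hb hab
  rw [Prod.Lex.lt_iff]
  rw [hm a ha, hm b hb]
  exact Or.inr ⟨rfl, lt_of_le_of_ne hab.1 hab.2⟩

lemma pvRank_not_O {x : String} (hx : ¬ x = "O") :
    pvRank x = (if PySem.Str.startswith x "B-" then 1
      else if PySem.Str.startswith x "I-" then 2 else 3) := by
  simp [pvRank, hx]

-- A's result once the "O" handling is done: the two prefix buckets then the rest,
-- as one strictly key-increasing permutation of the remaining set.
lemma tail_spec (R1 sB R2 sI R3 sRest : List String)
    (hnd : R1.Nodup) (hO : "O" ∉ R1)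
    (hsB : sB = PySem.List.sorted (R1.filter (fun l => PySem.Str.startswith l "B-")) (fun x => x))
    (hR2 : R2 = PySem.Set.diff R1 sB)
    (hsI : sI = PySem.List.sorted (R2.filter (fun l => PySem.Str.startswith l "I-")) (fun x => x))
    (hR3 : R3 = PySem.Set.diff R2 sI)
    (hsRest : sRest = PySem.List.sorted R3 (fun x => x)) :
    (sB ++ (sI ++ sRest)).Perm R1 ∧
    (sB ++ (sI ++ sRest)).Pairwise (fun a b => toLex (pvRank a, a) < toLex (pvRank b, b)) := by
  have hsBp : sB.Perm (R1.filter (fun l => PySem.Str.startswith l "B-")) := by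
    rw [hsB]; exact PySem.List.sorted_perm _ _ _
  have memB : ∀ x, x ∈ sB ↔ x ∈ R1 ∧ PySem.Str.startswith x "B-" = true := by
    intro x; rw [hsBp.mem_iff, List.mem_filter]
  have hR2' : R2 = R1.filter (fun x => !PySem.Str.startswith x "B-") := by
    rw [hR2, PySem.Set.diff]
    refine List.filter_congr ?_
    intro x hx
    by_cases hb : PySem.Str.startswith x "B-" = true
    · have hc : sB.contains x = true := List.contains_iff_mem.mpr ((memB x).mpr ⟨hx, hb⟩)
      simp only [PySem.Set.contains]
      rw [hc, hb]
    · have hc : sB.contains x = false := by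
        rw [Bool.eq_false_iff]
        intro hc
        exact hb ((memB x).mp (List.contains_iff_mem.mp hc)).2
      simp only [PySem.Set.contains]
      rw [hc, Bool.eq_false_iff.mpr hb]
  have memR2 : ∀ x, x ∈ R2 ↔ x ∈ R1 ∧ ¬ PySem.Str.startswith x "B-" = true := by
    intro x; rw [hR2', List.mem_filter]; simp
  have ndR2 : R2.Nodup := hR2' ▸ hnd.filter _
  have hsIp : sI.Perm (R2.filter (fun l => PySem.Str.startswith l "I-")) := by
    rw [hsI]; exact PySem.List.sorted_perm _ _ _
  have memI : ∀ x, x ∈ sI ↔ x ∈ R2 ∧ PySem.Str.startswith x "I-" = true := by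
    intro x; rw [hsIp.mem_iff, List.mem_filter]
  have hR3' : R3 = R2.filter (fun x => !PySem.Str.startswith x "I-") := by
    rw [hR3, PySem.Set.diff]
    refine List.filter_congr ?_
    intro x hx
    by_cases hb : PySem.Str.startswith x "I-" = true
    · have hc : sI.contains x = true := List.contains_iff_mem.mpr ((memI x).mpr ⟨hx, hb⟩)
      simp only [PySem.Set.contains]
      rw [hc, hb]
    · have hc : sI.contains x = false := by
        rw [Bool.eq_false_iff]
        intro hc
        exact hb ((memI x).mp (List.contains_iff_mem.mp hc)).2
      simp only [PySem.Set.contains]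
      rw [hc, Bool.eq_false_iff.mpr hb]
  have memR3 : ∀ x, x ∈ R3 ↔ x ∈ R2 ∧ ¬ PySem.Str.startswith x "I-" = true := by
    intro x; rw [hR3', List.mem_filter]; simp
  have ndR3 : R3.Nodup := hR3' ▸ ndR2.filter _
  have hsRestp : sRest.Perm R3 := by rw [hsRest]; exact PySem.List.sorted_perm _ _ _
  -- the permutation half
  have hperm : (sB ++ (sI ++ sRest)).Perm R1 := by
    have h1 : (sI ++ sRest).Perm R2 := by
      refine ((hsIp.append hsRestp).trans ?_)
      rw [hR3']
      exact List.filter_append_perm _ R2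
    refine ((hsBp.append h1).trans ?_)
    rw [hR2']
    exact List.filter_append_perm _ R1
  refine ⟨hperm, ?_⟩
  -- rank values on the three blocks
  have hrB : ∀ x ∈ sB, pvRank x = 1 := by
    intro x hx
    obtain ⟨hx1, hb⟩ := (memB x).mp hx
    rw [pvRank_not_O (fun h => hO (h ▸ hx1)), if_pos hb]
  have hrI : ∀ x ∈ sI, pvRank x = 2 := by
    intro x hx
    obtain ⟨hx2, hi⟩ := (memI x).mp hx
    obtain ⟨hx1, hnb⟩ := (memR2 x).mp hx2
    rw [pvRank_not_O (fun h => hO (h ▸ hx1)), if_neg hnb, if_pos hi]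
  have hrRest : ∀ x ∈ sRest, pvRank x = 3 := by
    intro x hx
    obtain ⟨hx3, hni⟩ := (memR3 x).mp (hsRestp.mem_iff.mp hx)
    obtain ⟨hx1, hnb⟩ := (memR2 x).mp hx3
    rw [pvRank_not_O (fun h => hO (h ▸ hx1)), if_neg hnb, if_neg hni]
  -- pairwise within each block
  have pwB : sB.Pairwise (fun a b => toLex (pvRank a, a) < toLex (pvRank b, b)) := by
    refine pairwise_lex_of_const_rank sB 1 hrB (hsBp.nodup_iff.mpr (hnd.filter _)) ?_
    rw [hsB]; exact PySem.List.sorted_pairwise _ _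
  have pwI : sI.Pairwise (fun a b => toLex (pvRank a, a) < toLex (pvRank b, b)) := by
    refine pairwise_lex_of_const_rank sI 2 hrI (hsIp.nodup_iff.mpr (ndR2.filter _)) ?_
    rw [hsI]; exact PySem.List.sorted_pairwise _ _
  have pwRest : sRest.Pairwise (fun a b => toLex (pvRank a, a) < toLex (pvRank b, b)) := by
    refine pairwise_lex_of_const_rank sRest 3 hrRest (hsRestp.nodup_iff.mpr ndR3) ?_
    rw [hsRest]; exact PySem.List.sorted_pairwise _ _
  rw [List.pairwise_append]
  refine ⟨pwB, ?_, ?_⟩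
  · rw [List.pairwise_append]
    refine ⟨pwI, pwRest, ?_⟩
    intro a ha b hb
    rw [Prod.Lex.lt_iff]
    exact Or.inl (by rw [hrI a ha, hrRest b hb]; norm_num)
  · intro a ha b hb
    rw [Prod.Lex.lt_iff]
    rcases List.mem_append.mp hb with hb | hb
    · exact Or.inl (by rw [hrB a ha, hrI b hb]; norm_num)
    · exact Or.inl (by rw [hrB a ha, hrRest b hb]; norm_num)

lemma pvRank_O : pvRank "O" = 0 := by decide

lemma pvRank_pos {x : String} (hx : ¬ x = "O") : 0 < pvRank x := by
  rw [pvRank_not_O hx]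
  split_ifs <;> norm_num

-- ===== VERDICT (by name: the statement is the Claim_ definition above) =====
theorem ordered_labels_py_spec : Claim_equal_ordered_labels_py := by
  intro labels _
  unfold Spec_ordered_labels_py ordered_labels_py_alt
  rw [sorted2_eq_sorted_lex]
  have hndS : (PySem.Set.ofList labels).Nodup := PySem.Set.nodup_ofList labels
  by_cases hc : PySem.Set.contains (PySem.Set.ofList labels) "O" = true
  · -- "O" is present: A emits it first, then the three sorted buckets
    have hOmem : "O" ∈ PySem.Set.ofList labels := (PySem.Set.contains_iff _ _).mp hc
    have hndR1 : (PySem.Set.discard (PySem.Set.ofList labels) "O").Nodup :=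
      PySem.Set.nodup_discard _ "O" hndS
    have hOR1 : "O" ∉ PySem.Set.discard (PySem.Set.ofList labels) "O" := by
      intro h
      exact ((PySem.Set.mem_discard _ _ _).mp h).2 rfl
    obtain ⟨hperm, hpw⟩ := tail_spec (PySem.Set.discard (PySem.Set.ofList labels) "O")
      _ _ _ _ _ hndR1 hOR1 rfl rfl rfl rfl rfl
    have herase : (PySem.Set.ofList labels).erase "O" =
        PySem.Set.discard (PySem.Set.ofList labels) "O" := by
      rw [hndS.erase_eq_filter]
      rfl
    have hpermAll := (List.Perm.cons "O" hperm).trans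
      (herase ▸ (List.perm_cons_erase hOmem).symm)
    have hpwAll := List.pairwise_cons.mpr
      (⟨fun b hb => by
        have hbO : ¬ b = "O" := fun h => hOR1 (h ▸ hperm.mem_iff.mp hb)
        rw [Prod.Lex.lt_iff]
        exact Or.inl (by rw [pvRank_O]; exact pvRank_pos hbO), hpw⟩)
    simp only [ordered_labels_py]
    rw [if_pos hc]
    simp only [List.foldl_cons, List.foldl_nil, List.nil_append, List.cons_append,
      List.append_assoc]
    exact (PySem.List.sorted_eq_of_perm_of_pairwise_lt _ _ _ hpermAll hpwAll).symm
  · -- no "O": A is just the three sorted buckets of the whole set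
    have hO : "O" ∉ PySem.Set.ofList labels := fun h =>
      hc ((PySem.Set.contains_iff _ _).mpr h)
    obtain ⟨hperm, hpw⟩ := tail_spec (PySem.Set.ofList labels)
      _ _ _ _ _ hndS hO rfl rfl rfl rfl rfl
    simp only [ordered_labels_py]
    rw [if_neg hc]
    simp only [List.foldl_cons, List.foldl_nil, List.nil_append, List.append_assoc]
    exact (PySem.List.sorted_eq_of_perm_of_pairwise_lt _ _ _ hperm hpw).symm
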